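-- pv_equiv track=rewrite | github.com/eshh05/imby | src/agents/summarizer_agent.py | _combine_section_summaries
-- ===== SOURCE A (Python) =====
-- from typing import Dict, Any, List, Optional
--
-- def _combine_section_summaries(sections: Dict[str, str]) -> str:
--     """Combine section summaries into a coherent full summary."""
--     summary_parts = []
--
--     # Order sections logically
--     section_order = ['abstract', 'introduction', 'methodology', 'results', 'conclusion']
--
--     for section_type in section_order:
--         if section_type in sections:
--             summary_parts.append(f"{section_type.title()}: {sections[section_type]}")
--
--     # Add any remaining sections
--     for section_type, summary in sections.items():
--         if section_type not in section_order:
--             summary_parts.append(f"{section_type.title()}: {summary}")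
--
--     return '\n\n'.join(summary_parts)
-- ===== SOURCE B (Python) =====
-- def _combine_section_summaries(sections):
--     """Combine section summaries into a coherent full summary."""
--     order = ['abstract', 'introduction', 'methodology', 'results', 'conclusion']
--     rank = {name: i for i, name in enumerate(order)}
--     # one bucket per canonical section, plus one shared bucket for unknown sections
--     buckets = [[] for _ in range(len(order) + 1)]
--     for name, summary in sections.items():
--         buckets[rank.get(name, len(order))].append(f"{name.title()}: {summary}")
--     return '\n\n'.join(part for bucket in buckets for part in bucket)
-- ===== Notes on version B (the rewrite author's own statement) =====
-- stated objective: alternative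
-- what changed: A's two scans (loop over the canonical order with a membership test per name, then a second loop over the items for leftovers) are replaced by a single rank-keyed bucket pass over the items: each item is appended to the bucket of its canonical rank (or the shared unknown bucket), and the buckets are concatenated.
import Mathlib
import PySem

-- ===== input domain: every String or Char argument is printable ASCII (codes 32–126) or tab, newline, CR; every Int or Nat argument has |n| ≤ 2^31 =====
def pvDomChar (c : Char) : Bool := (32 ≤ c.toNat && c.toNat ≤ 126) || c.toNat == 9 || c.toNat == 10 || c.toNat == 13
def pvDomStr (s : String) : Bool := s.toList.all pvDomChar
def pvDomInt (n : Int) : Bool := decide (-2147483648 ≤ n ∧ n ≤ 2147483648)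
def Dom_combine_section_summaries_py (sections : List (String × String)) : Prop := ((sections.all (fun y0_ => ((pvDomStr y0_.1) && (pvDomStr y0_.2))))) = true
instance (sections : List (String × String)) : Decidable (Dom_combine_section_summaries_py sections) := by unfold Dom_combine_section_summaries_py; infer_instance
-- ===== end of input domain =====

-- B replaces A's two scans (canonical-order loop with membership tests + leftover loop) by one rank-keyed
-- bucket pass over the items; objective: alternative decomposition, same cost.

-- shared helper: hand port of str.title() (word = maximal alphabetic run; exact on the ASCII domain)
def pyIsAlpha (c : Char) : Bool := ('a' ≤ c && c ≤ 'z') || ('A' ≤ c && c ≤ 'Z')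

def pyTitleChars : List Char → Bool → List Char
  | [], _ => []
  | c :: rest, prevAlpha =>
      (if pyIsAlpha c then (if prevAlpha then PySem.Chars.lowerChar c else PySem.Chars.upperChar c) else c)
        :: pyTitleChars rest (pyIsAlpha c)

-- shared helper: port of the f-string f"{k.title()}: {v}" (as a char list)
def fmtEntry (k v : String) : List Char := pyTitleChars k.toList false ++ ':' :: ' ' :: v.toList

-- ===== PORT A =====
def sectionOrderA : List String := ["abstract", "introduction", "methodology", "results", "conclusion"]

def combine_section_summaries_py (sections : List (String × String)) : String :=
  let d := PySem.Dict.mk sections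
  -- first loop: canonical sections in section_order ('section_type in sections' then 'sections[section_type]';
  -- getD's default is unreachable, the lookup is guarded by contains)
  let parts1 := sectionOrderA.foldl
    (fun acc st => if d.contains st then acc ++ [fmtEntry st (d.getD st "")] else acc)
    ([] : List (List Char))
  -- second loop: remaining items in insertion order
  let parts2 := sections.foldl
    (fun acc kv => if sectionOrderA.contains kv.1 then acc else acc ++ [fmtEntry kv.1 kv.2])
    parts1
  String.ofList (PySem.Chars.join ['\n', '\n'] parts2)

-- ===== PORT B =====
-- rank = {name: i for i, name in enumerate(order)}; the ranks are the literal indices 0..4 (nonnegative), so Nat is exact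
def rankTable : PySem.Dict String Nat :=
  PySem.Dict.mk [("abstract", 0), ("introduction", 1), ("methodology", 2), ("results", 3), ("conclusion", 4)]

def combine_section_summaries_py_alt (sections : List (String × String)) : String :=
  -- one bucket per canonical section plus one shared bucket (index 5) for unknown sections
  let buckets := sections.foldl
    (fun bs kv =>
      let i := rankTable.getD kv.1 5
      bs.set i (bs.getD i [] ++ [fmtEntry kv.1 kv.2]))
    (List.replicate 6 ([] : List (List Char)))
  String.ofList (PySem.Chars.join ['\n', '\n'] buckets.flatten)

-- ===== PRECONDITION & SPEC =====
-- Pre_ excludes association lists with duplicate keys, which cannot arise from a Python dict: there A's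
-- membership-guarded first loop emits one entry per duplicated canonical key while B keeps every item.
def Pre_combine_section_summaries_py (sections : List (String × String)) : Prop :=
  (sections.map Prod.fst).Nodup
instance (sections : List (String × String)) : Decidable (Pre_combine_section_summaries_py sections) := by
  unfold Pre_combine_section_summaries_py; infer_instance

def pvWitness_combine_section_summaries_py : (List (String × String)) :=
  [("results", "good results"), ("zeta notes", "extra")]

def Spec_combine_section_summaries_py (sections : List (String × String)) (out : String) : Prop :=
  out = combine_section_summaries_py_alt sections
instance (sections : List (String × String)) (out : String) : Decidable (Spec_combine_section_summaries_py sections out) := by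
  unfold Spec_combine_section_summaries_py; infer_instance

-- ===== CLAIM (what is proved, stated in full; the proofs are below) =====
def Claim_equal_combine_section_summaries_py : Prop :=
  ∀ (sections : List (String × String)), Dom_combine_section_summaries_py sections →
    Pre_combine_section_summaries_py sections →
    Spec_combine_section_summaries_py sections (combine_section_summaries_py sections)

-- ===== LEMMAS AND PROOFS =====

-- the per-key slice of the output: every item of `sections` whose key is `s`, formatted
def keySlice (sections : List (String × String)) (s : String) : List (List Char) :=
  (sections.filter (fun kv => kv.1 == s)).map (fun kv => fmtEntry kv.1 kv.2)

theorem filter_key_eq_nil (sections : List (String × String)) (s : String)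
    (h : s ∉ sections.map Prod.fst) :
    sections.filter (fun kv => kv.1 == s) = [] := by
  rw [List.filter_eq_nil_iff]
  intro a ha
  simp only [beq_iff_eq]
  intro he
  exact h (List.mem_map.mpr ⟨a, ha, he⟩)

-- A's guarded lookup entry for a key equals the per-key slice (needs unique keys)
theorem gA_eq_keySlice (sections : List (String × String)) (s : String)
    (h : (sections.map Prod.fst).Nodup) :
    (if (PySem.Dict.mk sections).contains s then
        [fmtEntry s ((PySem.Dict.mk sections).getD s "")] else []) = keySlice sections s := by
  induction sections with
  | nil => simp [keySlice, PySem.Dict.contains]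
  | cons kv t ih =>
    obtain ⟨k, v⟩ := kv
    simp only [List.map_cons, List.nodup_cons] at h
    by_cases hk : k = s
    · subst hk
      have ht : t.filter (fun kv => kv.1 == k) = [] := filter_key_eq_nil t k h.1
      simp [keySlice, PySem.Dict.getD_eq_get?_getD, PySem.Dict.get?_mk_cons,
        PySem.Dict.contains_eq_isSome_get?, ht]
    · have := ih h.2
      simp only [keySlice, List.filter_cons] at this ⊢
      rw [PySem.Dict.contains_eq_isSome_get?] at this ⊢
      rw [PySem.Dict.get?_mk_cons]
      rw [PySem.Dict.getD_eq_get?_getD, PySem.Dict.get?_mk_cons]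
      simp only [show (k == s) = false by simp [hk], Bool.false_eq_true, if_false]
      rw [← PySem.Dict.getD_eq_get?_getD]
      exact this

theorem rank_lt (k : String) : rankTable.getD k 5 < 6 := by
  simp [rankTable, PySem.Dict.getD_eq_get?_getD, PySem.Dict.get?_mk_cons]
  split_ifs <;> simp [PySem.Dict.get?]

theorem rank_eq0 (k : String) : (rankTable.getD k 5 == 0) = (k == "abstract") := by
  simp [rankTable, PySem.Dict.getD_eq_get?_getD, PySem.Dict.get?_mk_cons]
  split_ifs <;> simp_all [PySem.Dict.get?, eq_comm]

theorem rank_eq1 (k : String) : (rankTable.getD k 5 == 1) = (k == "introduction") := by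
  simp [rankTable, PySem.Dict.getD_eq_get?_getD, PySem.Dict.get?_mk_cons]
  split_ifs <;> simp_all [PySem.Dict.get?, eq_comm]

theorem rank_eq2 (k : String) : (rankTable.getD k 5 == 2) = (k == "methodology") := by
  simp [rankTable, PySem.Dict.getD_eq_get?_getD, PySem.Dict.get?_mk_cons]
  split_ifs <;> simp_all [PySem.Dict.get?, eq_comm]

theorem rank_eq3 (k : String) : (rankTable.getD k 5 == 3) = (k == "results") := by
  simp [rankTable, PySem.Dict.getD_eq_get?_getD, PySem.Dict.get?_mk_cons]
  split_ifs <;> simp_all [PySem.Dict.get?, eq_comm]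

theorem rank_eq4 (k : String) : (rankTable.getD k 5 == 4) = (k == "conclusion") := by
  simp [rankTable, PySem.Dict.getD_eq_get?_getD, PySem.Dict.get?_mk_cons]
  split_ifs <;> simp_all [PySem.Dict.get?, eq_comm]

theorem rank_eq5 (k : String) : (rankTable.getD k 5 == 5) = !(sectionOrderA.contains k) := by
  simp [rankTable, sectionOrderA, PySem.Dict.getD_eq_get?_getD, PySem.Dict.get?_mk_cons]
  split_ifs <;> simp_all [PySem.Dict.get?, eq_comm]

-- invariant of B's bucket fold
theorem bucket_fold_getD (l : List (String × String)) (bs : List (List (List Char)))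
    (hb : bs.length = 6) (i : Nat) :
    (l.foldl (fun bs kv =>
        let i := rankTable.getD kv.1 5
        bs.set i (bs.getD i [] ++ [fmtEntry kv.1 kv.2])) bs).getD i []
      = bs.getD i [] ++ (l.filter (fun kv => rankTable.getD kv.1 5 == i)).map (fun kv => fmtEntry kv.1 kv.2) := by
  induction l generalizing bs with
  | nil => simp
  | cons kv t ih =>
    simp only [List.foldl_cons, List.filter_cons]
    rw [ih _ (by simp [hb])]
    by_cases hri : rankTable.getD kv.1 5 = i
    · subst hri
      simp [List.getD_eq_getElem?_getD, List.getElem?_set_self (by rw [hb]; exact rank_lt kv.1)]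
    · simp [List.getD_eq_getElem?_getD, List.getElem?_set_ne hri, hri]

theorem bucket_fold_length (l : List (String × String)) (bs : List (List (List Char))) :
    (l.foldl (fun bs kv =>
        let i := rankTable.getD kv.1 5
        bs.set i (bs.getD i [] ++ [fmtEntry kv.1 kv.2])) bs).length = bs.length := by
  induction l generalizing bs with
  | nil => rfl
  | cons kv t ih => rw [List.foldl_cons, ih]; simp

theorem flatten_six {α : Type} (bs : List (List α)) (h : bs.length = 6) :
    bs.flatten = bs.getD 0 [] ++ bs.getD 1 [] ++ bs.getD 2 [] ++ bs.getD 3 [] ++ bs.getD 4 [] ++ bs.getD 5 [] := by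
  rcases bs with _|⟨a, _|⟨b, _|⟨c, _|⟨d, _|⟨e, _|⟨f, _|⟨g, t⟩⟩⟩⟩⟩⟩⟩ <;> simp_all

theorem foldl_skip_if {α β : Type} (l : List α) (p : α → Bool) (f : α → β) (acc : List β) :
    l.foldl (fun acc x => if p x then acc else acc ++ [f x]) acc
      = acc ++ (l.filter (fun x => !p x)).map f := by
  induction l generalizing acc with
  | nil => simp
  | cons x t ih =>
    simp only [List.foldl_cons, List.filter_cons, ih]
    by_cases hp : p x <;> simp [hp]

-- ===== VERDICT (by name: the statement is the Claim_ definition above) =====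
theorem combine_section_summaries_py_spec : Claim_equal_combine_section_summaries_py := by
  intro sections _ hpre
  unfold Spec_combine_section_summaries_py
  unfold combine_section_summaries_py combine_section_summaries_py_alt
  dsimp only
  congr 1
  congr 1
  -- B side: buckets
  rw [flatten_six _ (by rw [bucket_fold_length]; rfl)]
  rw [bucket_fold_getD sections _ rfl 0, bucket_fold_getD sections _ rfl 1,
      bucket_fold_getD sections _ rfl 2, bucket_fold_getD sections _ rfl 3,
      bucket_fold_getD sections _ rfl 4, bucket_fold_getD sections _ rfl 5]
  simp only [List.filter_congr (fun (kv : String × String) _ => rank_eq0 kv.1),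
    List.filter_congr (fun (kv : String × String) _ => rank_eq1 kv.1),
    List.filter_congr (fun (kv : String × String) _ => rank_eq2 kv.1),
    List.filter_congr (fun (kv : String × String) _ => rank_eq3 kv.1),
    List.filter_congr (fun (kv : String × String) _ => rank_eq4 kv.1),
    List.filter_congr (fun (kv : String × String) _ => rank_eq5 kv.1)]
  -- A side: unfold the five-step canonical loop, push the appends out
  have hpush : ∀ (acc : List (List Char)) (st : String),
      (if (PySem.Dict.mk sections).contains st then
          acc ++ [fmtEntry st ((PySem.Dict.mk sections).getD st "")] else acc)
        = acc ++ (if (PySem.Dict.mk sections).contains st then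
            [fmtEntry st ((PySem.Dict.mk sections).getD st "")] else []) := by
    intro acc st; split <;> simp
  rw [foldl_skip_if]
  simp only [sectionOrderA, List.foldl_cons, List.foldl_nil]
  rw [hpush, hpush, hpush, hpush, hpush]
  rw [gA_eq_keySlice sections "abstract" hpre, gA_eq_keySlice sections "introduction" hpre,
      gA_eq_keySlice sections "methodology" hpre, gA_eq_keySlice sections "results" hpre,
      gA_eq_keySlice sections "conclusion" hpre]
  simp [keySlice, List.append_assoc]
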